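-- pv_equiv track=rewrite | github.com/dfjmsf/Agent | agents/integration_tester.py | _extract_failure_info
-- ===== SOURCE A (Python) =====
-- def _extract_failure_info(output: str) -> str:
--     lines = output.split("\n")
--     failure_lines = []
--     capture = False
--     for line in lines:
--         if "INTEGRATION_TEST_FAILED" in line:
--             failure_lines.append(line)
--             capture = True
--         elif capture:
--             failure_lines.append(line)
--     return "\n".join(failure_lines) if failure_lines else output[-500:]
-- ===== SOURCE B (Python) =====
-- def _extract_failure_info(output: str) -> str:
--     idx = output.find("INTEGRATION_TEST_FAILED")
--     if idx == -1:
--         return output[-500:]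
--     start = output.rfind("\n", 0, idx) + 1
--     return output[start:]
-- ===== Notes on version B (the rewrite author's own statement) =====
-- stated objective: simpler
-- what changed: Instead of splitting into lines and folding with a capture flag, B locates the first marker occurrence in the raw string with find, backs up to the start of that line with rfind, and returns one slice; the split/join roundtrip disappears.
import Mathlib
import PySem

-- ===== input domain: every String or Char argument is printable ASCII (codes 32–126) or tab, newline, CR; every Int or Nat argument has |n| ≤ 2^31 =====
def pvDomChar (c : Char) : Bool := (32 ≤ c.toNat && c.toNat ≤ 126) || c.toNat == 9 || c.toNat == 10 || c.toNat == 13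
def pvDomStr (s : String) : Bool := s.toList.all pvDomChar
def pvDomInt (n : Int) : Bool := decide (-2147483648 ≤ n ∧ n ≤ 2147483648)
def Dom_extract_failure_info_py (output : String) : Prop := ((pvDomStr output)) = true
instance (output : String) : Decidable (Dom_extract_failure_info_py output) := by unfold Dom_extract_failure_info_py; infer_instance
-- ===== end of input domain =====

-- B replaces A's split-into-lines + capture-flag fold + join by two raw-string searches
-- (find the marker, rfind the preceding newline) and a single slice; objective: simpler.

-- ===== PORT A =====
def extract_failure_info_py (output : String) : String :=
  let lines : List String := (PySem.Str.split? output "\n").getD []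
  let res :=
    lines.foldl
      (fun (st : List String × Bool) line =>
        if PySem.Str.isIn "INTEGRATION_TEST_FAILED" line then (st.1 ++ [line], true)
        else if st.2 then (st.1 ++ [line], st.2) else st)
      ([], false)
  if res.1 = [] then PySem.Str.slice output (some (-500)) none
  else PySem.Str.join "\n" res.1

-- ===== PORT B =====
def extract_failure_info_py_alt (output : String) : String :=
  let idx := PySem.Str.find output "INTEGRATION_TEST_FAILED"
  if idx = -1 then PySem.Str.slice output (some (-500)) none
  else
    let start := PySem.Str.rfindFrom output "\n" 0 (some idx) + 1
    PySem.Str.slice output (some start) none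

-- ===== PRECONDITION & SPEC =====
def Spec_extract_failure_info_py (output : String) (out : String) : Prop := out = extract_failure_info_py_alt output
instance (output : String) (out : String) : Decidable (Spec_extract_failure_info_py output out) := by unfold Spec_extract_failure_info_py; infer_instance

-- ===== CLAIM (what is proved, stated in full; the proofs are below) =====
def Claim_equal_extract_failure_info_py : Prop := ∀ (output : String), Dom_extract_failure_info_py output → Spec_extract_failure_info_py output (extract_failure_info_py output)

-- ===== LEMMAS AND PROOFS =====

-- pure single-character split (proof-side model of str.split("\n"))
def pvSplitC (c : Char) : List Char → List (List Char)
  | [] => [[]]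
  | a :: rest => if a = c then [] :: pvSplitC c rest else (pvSplitC c rest).modifyHead (a :: ·)

theorem pvSplitC_ne_nil (c : Char) (l : List Char) : pvSplitC c l ≠ [] := by
  induction l with
  | nil => simp [pvSplitC]
  | cons a rest ih =>
    simp only [pvSplitC]
    split_ifs
    · simp
    · cases h : pvSplitC c rest with
      | nil => exact absurd h ih
      | cons p ps => simp [List.modifyHead]

theorem pv_join_pvSplitC (c : Char) (l : List Char) :
    PySem.Chars.join [c] (pvSplitC c l) = l := by
  induction l with
  | nil => simp [pvSplitC, PySem.Chars.join_singleton]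
  | cons a rest ih =>
    simp only [pvSplitC]
    split_ifs with hac
    · subst hac
      cases h : pvSplitC a rest with
      | nil => exact absurd h (pvSplitC_ne_nil a rest)
      | cons q qs =>
        rw [h] at ih
        rw [PySem.Chars.join_cons_cons]
        simp [ih]
    · cases h : pvSplitC c rest with
      | nil => exact absurd h (pvSplitC_ne_nil c rest)
      | cons q qs =>
        rw [h] at ih
        cases qs with
        | nil =>
          simp only [List.modifyHead]
          rw [PySem.Chars.join_singleton] at ih ⊢
          simp [ih]
        | cons q' qs' =>
          simp only [List.modifyHead]
          rw [PySem.Chars.join_cons_cons] at ih ⊢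
          simp [← ih]

theorem pv_not_mem_of_mem_pvSplitC (c : Char) (l : List Char) :
    ∀ p ∈ pvSplitC c l, c ∉ p := by
  induction l with
  | nil => simp [pvSplitC]
  | cons a rest ih =>
    intro p hp
    simp only [pvSplitC] at hp
    split_ifs at hp with hac
    · rcases List.mem_cons.mp hp with h | h
      · subst h; simp
      · exact ih p h
    · cases h : pvSplitC c rest with
      | nil => exact absurd h (pvSplitC_ne_nil c rest)
      | cons q qs =>
        rw [h] at hp
        simp only [List.modifyHead] at hp
        rcases List.mem_cons.mp hp with h2 | h2
        · subst h2
          have hq : c ∉ q := ih q (by rw [h]; exact List.mem_cons_self ..)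
          simp [hac, hq]
          intro hca; exact hac hca.symm
        · exact ih p (by rw [h]; exact List.mem_cons_of_mem _ h2)

theorem pv_splitOn_go_spec (c : Char) (l : List Char) :
    ∀ (fuel : Nat) (cur : List Char) (acc : List (List Char)), l.length < fuel →
      PySem.Chars.splitOn.go [c] fuel l cur acc
        = acc.reverse ++ (pvSplitC c l).modifyHead (cur.reverse ++ ·) := by
  induction l with
  | nil =>
    intro fuel cur acc hf
    cases fuel with
    | zero => omega
    | succ fuel => simp [PySem.Chars.splitOn.go, pvSplitC, List.modifyHead]
  | cons a rest ih =>
    intro fuel cur acc hf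
    cases fuel with
    | zero => omega
    | succ fuel =>
      simp only [PySem.Chars.splitOn.go]
      by_cases hac : a = c
      · subst hac
        have hpre : List.isPrefixOf [a] (a :: rest) = true := by
          simp [List.isPrefixOf_iff_prefix]
        rw [if_pos hpre]
        have hlen : rest.length < fuel := by simp at hf; omega
        rw [show List.drop (List.length [a]) (a :: rest) = rest by simp]
        rw [ih fuel [] (cur.reverse :: acc) hlen]
        simp only [pvSplitC, if_pos rfl]
        cases h : pvSplitC a rest with
        | nil => exact absurd h (pvSplitC_ne_nil a rest)
        | cons q qs => simp [List.modifyHead]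
      · have hpre : List.isPrefixOf [c] (a :: rest) = false := by
          simp only [List.isPrefixOf, List.isPrefixOf_nil_left, Bool.and_true, beq_eq_false_iff_ne, ne_eq]
          exact fun h => hac h.symm
        rw [if_neg (by simp [hpre])]
        have hlen : rest.length < fuel := by simp at hf; omega
        rw [ih fuel (a :: cur) acc hlen]
        simp only [pvSplitC, if_neg hac]
        cases h : pvSplitC c rest with
        | nil => exact absurd h (pvSplitC_ne_nil c rest)
        | cons q qs => simp [List.modifyHead]

theorem pv_splitOn_eq_pvSplitC (c : Char) (l : List Char) :
    PySem.Chars.splitOn l [c] = pvSplitC c l := by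
  have h := pv_splitOn_go_spec c l (l.length + 1) [] [] (by omega)
  rw [PySem.Chars.splitOn, h]
  cases hs : pvSplitC c l with
  | nil => exact absurd hs (pvSplitC_ne_nil c l)
  | cons q qs => simp [List.modifyHead]

-- A's loop
theorem pv_foldl_capture_true (q : String → Bool) (ls : List String) (acc : List String) :
    ls.foldl
      (fun (st : List String × Bool) line =>
        if q line then (st.1 ++ [line], true)
        else if st.2 then (st.1 ++ [line], st.2) else st)
      (acc, true) = (acc ++ ls, true) := by
  induction ls generalizing acc with
  | nil => simp
  | cons l ls ih =>
    simp only [List.foldl_cons]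
    by_cases hq : q l
    · simp only [hq, if_true]
      rw [ih]; simp
    · simp only [hq, Bool.false_eq_true, if_false, if_true]
      rw [ih]; simp

theorem pv_foldl_capture_false (q : String → Bool) (ls : List String) (acc : List String) :
    (ls.foldl
      (fun (st : List String × Bool) line =>
        if q line then (st.1 ++ [line], true)
        else if st.2 then (st.1 ++ [line], st.2) else st)
      (acc, false)).1 = acc ++ ls.dropWhile (fun l => !q l) := by
  induction ls generalizing acc with
  | nil => simp
  | cons l ls ih =>
    simp only [List.foldl_cons]
    by_cases hq : q l
    · simp only [if_pos hq]
      rw [pv_foldl_capture_true]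
      simp [List.dropWhile_cons, hq]
    · simp only [if_neg hq, Bool.false_eq_true, if_neg (by simp : ¬False)]
      rw [ih]
      simp [List.dropWhile_cons, hq]

-- prefix / infix across a separator the needle avoids
theorem pv_prefix_split (c : Char) (m xs ys : List Char) (hc : c ∉ m) :
    m <+: xs ++ c :: ys ↔ m <+: xs := by
  induction m generalizing xs with
  | nil => simp
  | cons b m ih =>
    have hbc : b ≠ c := fun h => hc (h ▸ List.mem_cons_self ..)
    have hcm : c ∉ m := fun h => hc (List.mem_cons_of_mem _ h)
    cases xs with
    | nil =>
      simp only [List.nil_append, List.cons_prefix_cons]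
      constructor
      · rintro ⟨h1, -⟩; exact absurd h1 hbc
      · intro h; exact absurd (List.prefix_nil.mp h) (by simp)
    | cons x xs =>
      simp only [List.cons_append, List.cons_prefix_cons]
      rw [ih xs hcm]

theorem pv_infix_split (c : Char) (m xs ys : List Char) (hc : c ∉ m) :
    m <:+: xs ++ c :: ys ↔ m <:+: xs ∨ m <:+: ys := by
  induction xs with
  | nil =>
    simp only [List.nil_append]
    rw [List.infix_cons_iff]
    have h1 : m <+: c :: ys ↔ m <+: ([] : List Char) := pv_prefix_split c m [] ys hc
    rw [h1]
    simp [List.infix_nil, List.prefix_nil]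
  | cons x xs ih =>
    simp only [List.cons_append]
    rw [List.infix_cons_iff, ih]
    have h1 : m <+: x :: (xs ++ c :: ys) ↔ m <+: x :: xs := by
      have := pv_prefix_split c m (x :: xs) ys hc
      simpa using this
    rw [h1, List.infix_cons_iff (l₂ := xs)]
    tauto

theorem pv_infix_join (c : Char) (m : List Char) (L : List (List Char))
    (hc : c ∉ m) (hm : m ≠ []) :
    m <:+: PySem.Chars.join [c] L ↔ ∃ p ∈ L, m <:+: p := by
  induction L with
  | nil =>
    simp only [PySem.Chars.join_nil]
    simp [List.infix_nil, hm]
  | cons p L ih =>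
    cases L with
    | nil => simp [PySem.Chars.join_singleton]
    | cons q qs =>
      rw [PySem.Chars.join_cons_cons]
      have : p ++ [c] ++ PySem.Chars.join [c] (q :: qs) = p ++ c :: PySem.Chars.join [c] (q :: qs) := by
        simp
      rw [this, pv_infix_split c m _ _ hc, ih]
      simp only [List.mem_cons]
      constructor
      · rintro (h | ⟨r, hr, h⟩)
        · exact ⟨p, Or.inl rfl, h⟩
        · exact ⟨r, Or.inr hr, h⟩
      · rintro ⟨r, hr | hr, h⟩
        · exact Or.inl (hr ▸ h)
        · exact Or.inr ⟨r, hr, h⟩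

-- find recursion and append rule
theorem pv_find_go (m l : List Char) (k : Nat) :
    PySem.Chars.find.go m l k =
      if PySem.Chars.find l m = -1 then -1 else k + PySem.Chars.find l m := by
  induction l generalizing k with
  | nil =>
    show PySem.Chars.find.go m [] k = _
    have h : PySem.Chars.find [] m = PySem.Chars.find.go m [] 0 := rfl
    rw [h]
    simp only [PySem.Chars.find.go]
    by_cases hm : m.isEmpty <;> simp [hm]
  | cons a t ih =>
    have hcons : PySem.Chars.find (a :: t) m =
        if m.isPrefixOf (a :: t) then 0
        else if PySem.Chars.find t m = -1 then -1 else 1 + PySem.Chars.find t m := by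
      show PySem.Chars.find.go m (a :: t) 0 = _
      simp only [PySem.Chars.find.go]
      rw [ih 1]
      by_cases hp : m.isPrefixOf (a :: t) <;> simp [hp]
    show PySem.Chars.find.go m (a :: t) k = _
    simp only [PySem.Chars.find.go]
    rw [ih (k + 1), hcons]
    have h0 := PySem.Chars.neg_one_le_find t m
    by_cases hp : m.isPrefixOf (a :: t)
    · rw [if_pos hp, if_pos hp, if_neg (show ¬((0 : Int) = -1) by omega)]
      omega
    · rw [if_neg hp, if_neg hp]
      by_cases hf : PySem.Chars.find t m = -1
      · simp [hf]
      · rw [if_neg hf, if_neg hf, if_neg (show ¬((1 : Int) + PySem.Chars.find t m = -1) by omega)]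
        push_cast
        omega

theorem pv_find_cons (m : List Char) (a : Char) (t : List Char) :
    PySem.Chars.find (a :: t) m =
      if m.isPrefixOf (a :: t) then 0
      else if PySem.Chars.find t m = -1 then -1 else 1 + PySem.Chars.find t m := by
  have h : PySem.Chars.find (a :: t) m = PySem.Chars.find.go m (a :: t) 0 := rfl
  rw [h]
  simp only [PySem.Chars.find.go]
  rw [pv_find_go]
  by_cases hp : m.isPrefixOf (a :: t) <;> simp [hp]

theorem pv_find_append (c : Char) (m xs ys : List Char) (hc : c ∉ m) (hm : m ≠ []) :
    PySem.Chars.find (xs ++ c :: ys) m =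
      if PySem.Chars.isIn m xs then PySem.Chars.find xs m
      else if PySem.Chars.find ys m = -1 then -1
      else xs.length + 1 + PySem.Chars.find ys m := by
  induction xs with
  | nil =>
    have hnp : m.isPrefixOf (c :: ys) = false := by
      rw [Bool.eq_false_iff]
      intro h
      rw [List.isPrefixOf_iff_prefix] at h
      cases m with
      | nil => exact hm rfl
      | cons b m' =>
        rw [List.cons_prefix_cons] at h
        exact hc (h.1 ▸ List.mem_cons_self ..)
    have hfind : PySem.Chars.find [] m = -1 := by
      show PySem.Chars.find.go m [] 0 = -1
      simp only [PySem.Chars.find.go]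
      simp [List.isEmpty_iff, hm]
    have hisin : PySem.Chars.isIn m [] = false := by
      rw [PySem.Chars.isIn, hfind]; rfl
    rw [List.nil_append, pv_find_cons, hnp, hisin]
    simp only [Bool.false_eq_true, if_false, List.length_nil]
    by_cases hf : PySem.Chars.find ys m = -1
    · rw [if_pos hf, if_pos hf]
    · rw [if_neg hf, if_neg hf]
      push_cast
      omega
  | cons x xs ih =>
    have hpre := pv_prefix_split c m (x :: xs) ys hc
    have hpb : m.isPrefixOf (x :: (xs ++ c :: ys)) = m.isPrefixOf (x :: xs) := by
      rw [Bool.eq_iff_iff, List.isPrefixOf_iff_prefix, List.isPrefixOf_iff_prefix]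
      simpa using hpre
    rw [List.cons_append, pv_find_cons, ih, hpb]
    have h0xs := PySem.Chars.neg_one_le_find xs m
    have h0ys := PySem.Chars.neg_one_le_find ys m
    have hxx := pv_find_cons m x xs
    by_cases hp : m.isPrefixOf (x :: xs) = true
    · have hf0 : PySem.Chars.find (x :: xs) m = 0 := by rw [hxx, if_pos hp]
      have hisin : PySem.Chars.isIn m (x :: xs) = true := by
        rw [PySem.Chars.isIn, hf0]; rfl
      rw [if_pos hp, if_pos hisin, hf0]
    · rw [if_neg hp]
      by_cases hxs : PySem.Chars.isIn m xs = true
      · have hfxs : PySem.Chars.find xs m ≠ -1 := by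
          rw [PySem.Chars.isIn] at hxs; simpa using hxs
        have hfx : PySem.Chars.find (x :: xs) m = 1 + PySem.Chars.find xs m := by
          rw [hxx, if_neg hp, if_neg hfxs]
        have hisin : PySem.Chars.isIn m (x :: xs) = true := by
          rw [PySem.Chars.isIn, hfx]
          simp only [bne_iff_ne, ne_eq]
          omega
        rw [if_pos hxs, if_pos hisin, hfx, if_neg hfxs]
      · have hfxs : PySem.Chars.find xs m = -1 := by
          rw [PySem.Chars.isIn] at hxs
          simpa using hxs
        have hfx : PySem.Chars.find (x :: xs) m = -1 := by
          rw [hxx, if_neg hp, if_pos hfxs]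
        have hisin : ¬ PySem.Chars.isIn m (x :: xs) = true := by
          rw [PySem.Chars.isIn, hfx]; simp
        rw [if_neg hxs, if_neg hisin]
        by_cases hys : PySem.Chars.find ys m = -1
        · rw [if_pos hys, if_pos hys, if_pos rfl]
        · rw [if_neg hys, if_neg hys,
            if_neg (show ¬((xs.length : Int) + 1 + PySem.Chars.find ys m = -1) by omega)]
          simp only [List.length_cons]
          push_cast
          omega

theorem pv_singleton_prefix (c : Char) (t : List Char) : [c] <+: t ↔ t.head? = some c := by
  cases t with
  | nil => simp
  | cons a t => simp [List.cons_prefix_cons, eq_comm]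

theorem pv_rfind_go_none (c : Char) (s : List Char) (k : Nat)
    (h : ∀ i, i ≤ k → s[i]? ≠ some c) :
    PySem.Chars.rfind.go s [c] k = -1 := by
  induction k with
  | zero =>
    simp only [PySem.Chars.rfind.go]
    have h0 : ¬ List.isPrefixOf [c] s = true := by
      rw [List.isPrefixOf_iff_prefix, pv_singleton_prefix, List.head?_eq_getElem?]
      exact h 0 (Nat.le_refl 0)
    rw [if_neg h0]
  | succ k ih =>
    simp only [PySem.Chars.rfind.go]
    have h0 : ¬ List.isPrefixOf [c] (s.drop (k + 1)) = true := by
      rw [List.isPrefixOf_iff_prefix, pv_singleton_prefix, List.head?_drop]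
      exact h (k + 1) (Nat.le_refl _)
    rw [if_neg h0]
    exact ih (fun i hi => h i (Nat.le_succ_of_le hi))

theorem pv_rfind_go_last (c : Char) (s : List Char) (j k : Nat)
    (hj : s[j]? = some c) (hafter : ∀ i, j < i → i ≤ k → s[i]? ≠ some c) (hjk : j ≤ k) :
    PySem.Chars.rfind.go s [c] k = j := by
  induction k with
  | zero =>
    have hj0 : j = 0 := Nat.le_zero.mp hjk
    subst hj0
    simp only [PySem.Chars.rfind.go]
    have h0 : List.isPrefixOf [c] s = true := by
      rw [List.isPrefixOf_iff_prefix, pv_singleton_prefix, List.head?_eq_getElem?]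
      exact hj
    rw [if_pos h0]
    simp
  | succ k ih =>
    simp only [PySem.Chars.rfind.go]
    by_cases hjk1 : j = k + 1
    · have h0 : List.isPrefixOf [c] (s.drop (k + 1)) = true := by
        rw [List.isPrefixOf_iff_prefix, pv_singleton_prefix, List.head?_drop, ← hjk1]
        exact hj
      rw [if_pos h0, hjk1]
    · have hjle : j ≤ k := by omega
      have h0 : ¬ List.isPrefixOf [c] (s.drop (k + 1)) = true := by
        rw [List.isPrefixOf_iff_prefix, pv_singleton_prefix, List.head?_drop]
        exact hafter (k + 1) (by omega) (Nat.le_refl _)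
      rw [if_neg h0]
      exact ih (fun i hi hik => hafter i hi (Nat.le_succ_of_le hik)) hjle

theorem pv_rfind_not_mem (c : Char) (s : List Char) (h : c ∉ s) :
    PySem.Chars.rfind s [c] = -1 := by
  rw [PySem.Chars.rfind]
  apply pv_rfind_go_none
  intro i _ hget
  exact h (List.mem_of_getElem? hget)

theorem pv_rfind_last (c : Char) (xs zs : List Char) (h : c ∉ zs) :
    PySem.Chars.rfind (xs ++ c :: zs) [c] = xs.length := by
  rw [PySem.Chars.rfind]
  apply pv_rfind_go_last c (xs ++ c :: zs) xs.length
  · rw [List.getElem?_append_right (Nat.le_refl _)]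
    simp
  · intro i hi _ hget
    rw [List.getElem?_append_right (by omega)] at hget
    have h1 : i - xs.length = (i - xs.length - 1) + 1 := by omega
    rw [h1] at hget
    simp only [List.getElem?_cons_succ] at hget
    exact h (List.mem_of_getElem? hget)
  · simp only [List.length_append, List.length_cons]
    omega

-- join of a decomposed line list
theorem pv_join_append (c : Char) (T : List (List Char)) (f : List Char) (R : List (List Char)) :
    PySem.Chars.join [c] (T ++ f :: R) =
      (if T = [] then [] else PySem.Chars.join [c] T ++ [c]) ++ PySem.Chars.join [c] (f :: R) := by
  induction T with
  | nil => simp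
  | cons t T ih =>
    cases T with
    | nil =>
      rw [List.cons_append, List.nil_append, PySem.Chars.join_cons_cons]
      simp [PySem.Chars.join_singleton]
    | cons t' T' =>
      have hc2 : (t :: t' :: T') ++ f :: R = t :: t' :: (T' ++ f :: R) := by simp
      rw [hc2, PySem.Chars.join_cons_cons [c] t t' (T' ++ f :: R)]
      have ih' := ih
      rw [show (t' :: T') ++ f :: R = t' :: (T' ++ f :: R) from rfl] at ih'
      rw [ih', if_neg (by simp), if_neg (by simp)]
      rw [PySem.Chars.join_cons_cons]
      simp [List.append_assoc]

theorem pv_find_join (c : Char) (m : List Char) (T : List (List Char)) (f : List Char)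
    (R : List (List Char)) (hc : c ∉ m) (hm : m ≠ [])
    (hT : ∀ p ∈ T, PySem.Chars.isIn m p = false) (hf : PySem.Chars.isIn m f = true) :
    PySem.Chars.find (PySem.Chars.join [c] (T ++ f :: R)) m =
      (if T = [] then 0 else (PySem.Chars.join [c] T).length + 1) + PySem.Chars.find f m := by
  induction T with
  | nil =>
    rw [List.nil_append, if_pos rfl]
    cases R with
    | nil =>
      rw [PySem.Chars.join_singleton]
      omega
    | cons r R' =>
      rw [PySem.Chars.join_cons_cons]
      have h1 : f ++ [c] ++ PySem.Chars.join [c] (r :: R') = f ++ c :: PySem.Chars.join [c] (r :: R') := by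
        simp
      rw [h1, pv_find_append c m _ _ hc hm, if_pos hf]
      omega
  | cons t T ih =>
    have hT' : ∀ p ∈ T, PySem.Chars.isIn m p = false := fun p hp => hT p (List.mem_cons_of_mem _ hp)
    have hTt : PySem.Chars.isIn m t = false := hT t (List.mem_cons_self ..)
    have hfpos : 0 ≤ PySem.Chars.find f m := by
      have := PySem.Chars.neg_one_le_find f m
      have hne : PySem.Chars.find f m ≠ -1 := by
        rw [PySem.Chars.isIn] at hf; simpa using hf
      omega
    have hcc : (t :: T) ++ f :: R = t :: (T ++ f :: R) := rfl
    rw [hcc]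
    have hjoin : PySem.Chars.join [c] (t :: (T ++ f :: R)) =
        t ++ c :: PySem.Chars.join [c] (T ++ f :: R) := by
      cases h2 : T ++ f :: R with
      | nil => exact absurd h2 (by simp)
      | cons u us =>
        rw [PySem.Chars.join_cons_cons]
        simp
    rw [hjoin, pv_find_append c m _ _ hc hm, if_neg (by simp [hTt]), ih hT']
    have hnn : ¬(((if T = [] then 0 else (PySem.Chars.join [c] T).length + 1 : Nat) : Int) + PySem.Chars.find f m = -1) := by
      have h9 : (0 : Int) ≤ ((if T = [] then 0 else (PySem.Chars.join [c] T).length + 1 : Nat) : Int) :=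
        Int.natCast_nonneg _
      omega
    rw [if_neg hnn]
    by_cases hTnil : T = []
    · subst hTnil
      rw [if_pos rfl, if_neg (by simp)]
      rw [PySem.Chars.join_singleton]
      push_cast
      omega
    · rw [if_neg hTnil, if_neg (by simp)]
      cases hT2 : T with
      | nil => exact absurd hT2 hTnil
      | cons u us =>
        rw [PySem.Chars.join_cons_cons]
        simp only [List.length_append, List.length_cons, List.length_nil]
        push_cast
        omega



theorem pv_dropWhile_head {α : Type} (p : α → Bool) (l : List α) (f : α) (R : List α)
    (h : List.dropWhile p l = f :: R) : p f = false := by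
  induction l with
  | nil => simp at h
  | cons a t ih =>
    rw [List.dropWhile_cons] at h
    by_cases hp : p a
    · rw [if_pos hp] at h
      exact ih h
    · rw [if_neg hp] at h
      cases h
      simpa using hp

-- B-side evaluation: with the line decomposition T ++ f :: R (f the first marker line),
-- rfind of '\n' before the first marker occurrence points at the separator before f,
-- so B's slice is exactly the join of f :: R.
theorem pv_B_eval (cs m : List Char) (hm : m ≠ []) (hcm : '\n' ∉ m)
    (T : List (List Char)) (f : List Char) (R : List (List Char))
    (hdecomp : pvSplitC '\n' cs = T ++ f :: R)
    (hTno : ∀ p ∈ T, PySem.Chars.isIn m p = false)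
    (hfq : PySem.Chars.isIn m f = true) :
    PySem.Chars.slice cs
      (some (PySem.Chars.rfindFrom cs ['\n'] 0 (some (PySem.Chars.find cs m)) + 1)) none
      = PySem.Chars.join ['\n'] (f :: R) := by
  have hcs : cs = PySem.Chars.join ['\n'] (T ++ f :: R) := by
    rw [← hdecomp, pv_join_pvSplitC]
  have hfcs : PySem.Chars.find cs m =
      ((if T = [] then 0 else (PySem.Chars.join ['\n'] T).length + 1 : Nat) : Int) +
        PySem.Chars.find f m := by
    conv_lhs => rw [hcs]
    exact pv_find_join '\n' m T f R hcm hm hTno hfq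
  have hjf0 : 0 ≤ PySem.Chars.find f m := by
    have h1 := PySem.Chars.neg_one_le_find f m
    have h2 : PySem.Chars.find f m ≠ -1 := by
      rw [PySem.Chars.isIn] at hfq; simpa using hfq
    omega
  have hspec := (PySem.Chars.find_spec (s := f) (sub := m) hjf0).1
  have hmlen : 0 < m.length := List.length_pos_iff.mpr hm
  have hflen : (PySem.Chars.find f m).toNat + m.length ≤ f.length := by
    have h1 : m.length ≤ (f.drop (PySem.Chars.find f m).toNat).length := hspec.length_le
    rw [List.length_drop] at h1
    omega
  have hfmem : f ∈ pvSplitC '\n' cs := by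
    rw [hdecomp]; exact List.mem_append_right _ (List.mem_cons_self ..)
  have hfnl : '\n' ∉ f := pv_not_mem_of_mem_pvSplitC '\n' cs f hfmem
  have htailnl : '\n' ∉ f.take (PySem.Chars.find f m).toNat :=
    fun h => hfnl (List.take_subset _ _ h)
  have hjoinsplit : cs =
      (if T = [] then [] else PySem.Chars.join ['\n'] T ++ ['\n']) ++
        PySem.Chars.join ['\n'] (f :: R) := by
    rw [hcs, pv_join_append]
  have hpreflen : (if T = [] then [] else PySem.Chars.join ['\n'] T ++ ['\n']).length =
      (if T = [] then 0 else (PySem.Chars.join ['\n'] T).length + 1) := by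
    by_cases hT : T = [] <;> simp [hT]
  obtain ⟨tl, htl⟩ : ∃ tl, PySem.Chars.join ['\n'] (f :: R) = f ++ tl := by
    cases R with
    | nil => exact ⟨[], by simp [PySem.Chars.join_singleton]⟩
    | cons r R' => exact ⟨['\n'] ++ PySem.Chars.join ['\n'] (r :: R'),
        by rw [PySem.Chars.join_cons_cons]; simp⟩
  have htoNat : (PySem.Chars.find cs m).toNat =
      (if T = [] then 0 else (PySem.Chars.join ['\n'] T).length + 1) +
        (PySem.Chars.find f m).toNat := by
    rw [hfcs]; omega
  have htake : cs.take (PySem.Chars.find cs m).toNat =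
      (if T = [] then [] else PySem.Chars.join ['\n'] T ++ ['\n']) ++
        f.take (PySem.Chars.find f m).toNat := by
    rw [htoNat]
    conv_lhs => rw [hjoinsplit, htl]
    rw [← hpreflen, List.take_append, List.take_of_length_le (Nat.le_add_right _ _),
      Nat.add_sub_cancel_left, List.take_append, Nat.sub_eq_zero_of_le (by omega),
      List.take_zero, List.append_nil]
  have hfle := PySem.Chars.find_le_length cs m
  have hfge : 0 ≤ PySem.Chars.find cs m := by
    rw [hfcs]
    have : (0 : Int) ≤ ((if T = [] then 0 else (PySem.Chars.join ['\n'] T).length + 1 : Nat) : Int) :=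
      Int.natCast_nonneg _
    omega
  have hrf : PySem.Chars.rfindFrom cs ['\n'] 0 (some (PySem.Chars.find cs m)) =
      ((if T = [] then 0 else (PySem.Chars.join ['\n'] T).length + 1 : Nat) : Int) - 1 := by
    simp only [PySem.Chars.rfindFrom]
    rw [if_neg (not_lt.mpr hfle), if_neg (lt_irrefl (0 : Int)), if_neg (not_lt.mpr hfge)]
    rw [show ((0 : Int).toNat) = 0 from rfl, List.drop_zero, htake]
    by_cases hT : T = []
    · rw [show ((if T = [] then [] else PySem.Chars.join ['\n'] T ++ ['\n']) : List Char) = []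
          from by rw [if_pos hT], List.nil_append]
      rw [pv_rfind_not_mem '\n' _ htailnl, if_pos rfl]
      simp [hT]
    · rw [show ((if T = [] then [] else PySem.Chars.join ['\n'] T ++ ['\n']) : List Char) =
            PySem.Chars.join ['\n'] T ++ ['\n'] from by rw [if_neg hT]]
      rw [show (PySem.Chars.join ['\n'] T ++ ['\n']) ++ f.take (PySem.Chars.find f m).toNat =
            PySem.Chars.join ['\n'] T ++ '\n' :: f.take (PySem.Chars.find f m).toNat from by simp]
      rw [pv_rfind_last '\n' _ _ htailnl]
      rw [if_neg (show ¬(((PySem.Chars.join ['\n'] T).length : Int) = -1) by omega)]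
      rw [if_neg hT]
      push_cast
      omega
  rw [hrf]
  have hstart : ((if T = [] then 0 else (PySem.Chars.join ['\n'] T).length + 1 : Nat) : Int) - 1 + 1 =
      ((if T = [] then 0 else (PySem.Chars.join ['\n'] T).length + 1 : Nat) : Int) := by omega
  rw [hstart]
  rw [PySem.Chars.slice_eq_listSlice, PySem.List.slice_from _ (Int.natCast_nonneg _), Int.toNat_natCast]
  conv_lhs => rw [hjoinsplit, ← hpreflen]
  exact List.drop_left

-- ===== VERDICT (by name: the statement is the Claim_ definition above) =====
theorem extract_failure_info_py_spec : Claim_equal_extract_failure_info_py := by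
  intro output _
  unfold Spec_extract_failure_info_py
  simp only [extract_failure_info_py, extract_failure_info_py_alt]
  have hm : ("INTEGRATION_TEST_FAILED".toList) ≠ ([] : List Char) := by decide
  have hcm : '\n' ∉ "INTEGRATION_TEST_FAILED".toList := by decide
  have hnl : ("\n" : String).toList = ['\n'] := by decide
  -- the split
  obtain ⟨ls, hls, hmap⟩ : ∃ ls, PySem.Str.split? output "\n" = some ls ∧
      ls.map String.toList = pvSplitC '\n' output.toList := by
    have h1 := PySem.Str.split?_map output "\n"
    rw [hnl, PySem.Chars.split?] at h1
    rw [if_neg (by simp)] at h1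
    cases h2 : PySem.Str.split? output "\n" with
    | none => rw [h2] at h1; simp at h1
    | some ls =>
      rw [h2] at h1
      simp only [Option.map_some, Option.some.injEq] at h1
      exact ⟨ls, rfl, by rw [h1, pv_splitOn_eq_pvSplitC]⟩
  rw [hls]
  simp only [Option.getD_some]
  -- the loop
  have hfold := pv_foldl_capture_false
    (fun l => PySem.Str.isIn "INTEGRATION_TEST_FAILED" l) ls []
  simp only [List.nil_append] at hfold
  rw [hfold]
  -- pointwise bridge for the line predicate
  have hq : ∀ l : String, PySem.Str.isIn "INTEGRATION_TEST_FAILED" l =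
      PySem.Chars.isIn "INTEGRATION_TEST_FAILED".toList l.toList := fun l =>
    PySem.Str.isIn_eq _ _
  rw [PySem.Str.find_eq]
  by_cases hfind : PySem.Chars.find output.toList "INTEGRATION_TEST_FAILED".toList = -1
  · -- no marker anywhere: both take the tail slice
    have hno : ∀ p ∈ pvSplitC '\n' output.toList,
        ¬ "INTEGRATION_TEST_FAILED".toList <:+: p := by
      intro p hp hinf
      have hin : "INTEGRATION_TEST_FAILED".toList <:+: output.toList := by
        rw [← pv_join_pvSplitC '\n' output.toList]
        exact (pv_infix_join '\n' _ _ hcm hm).mpr ⟨p, hp, hinf⟩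
      exact (PySem.Chars.find_eq_neg_one_iff _ _).mp hfind hin
    have hdw : List.dropWhile (fun l => !PySem.Str.isIn "INTEGRATION_TEST_FAILED" l) ls = [] := by
      rw [List.dropWhile_eq_nil_iff]
      intro l hl
      have hmem : l.toList ∈ pvSplitC '\n' output.toList := by
        rw [← hmap]; exact List.mem_map_of_mem hl
      have : PySem.Chars.isIn "INTEGRATION_TEST_FAILED".toList l.toList = false := by
        rw [Bool.eq_false_iff]
        intro habs
        exact hno _ hmem ((PySem.Chars.isIn_iff_infix _ _).mp habs)
      show (!PySem.Str.isIn "INTEGRATION_TEST_FAILED" l) = true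
      rw [hq l, this]
      rfl
    rw [hdw, if_pos rfl, if_pos hfind]
  · -- marker present
    rw [if_neg hfind]
    have hinf : "INTEGRATION_TEST_FAILED".toList <:+: output.toList := by
      by_contra h
      exact hfind ((PySem.Chars.find_eq_neg_one_iff _ _).mpr h)
    have hex := (pv_infix_join '\n' "INTEGRATION_TEST_FAILED".toList
        (pvSplitC '\n' output.toList) hcm hm).mp
      (by rw [pv_join_pvSplitC]; exact hinf)
    have hdwne : List.dropWhile (fun l => !PySem.Str.isIn "INTEGRATION_TEST_FAILED" l) ls ≠ [] := by
      intro h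
      rw [List.dropWhile_eq_nil_iff] at h
      obtain ⟨p, hp, hinfp⟩ := hex
      rw [← hmap] at hp
      obtain ⟨l, hl, rfl⟩ := List.mem_map.mp hp
      have h2 := h l hl
      rw [hq l] at h2
      rw [(PySem.Chars.isIn_iff_infix _ _).mpr hinfp] at h2
      simp at h2
    cases hdw : List.dropWhile (fun l => !PySem.Str.isIn "INTEGRATION_TEST_FAILED" l) ls with
    | nil => exact absurd hdw hdwne
    | cons f' R' =>
      rw [if_neg (by simp : ¬(f' :: R' = []))]
      apply String.toList_inj.mp
      rw [PySem.Str.toList_join, hnl, PySem.Str.toList_slice, PySem.Str.rfindFrom_eq, hnl]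
      -- decompose the lines
      have hTD : List.takeWhile (fun l => !PySem.Str.isIn "INTEGRATION_TEST_FAILED" l) ls ++
          f' :: R' = ls := by
        rw [← hdw, List.takeWhile_append_dropWhile]
      have hdecomp : pvSplitC '\n' output.toList =
          (List.takeWhile (fun l => !PySem.Str.isIn "INTEGRATION_TEST_FAILED" l) ls).map
            String.toList ++ f'.toList :: R'.map String.toList := by
        conv_lhs => rw [← hmap, ← hTD]
        rw [List.map_append, List.map_cons]
      have hTno : ∀ p ∈ (List.takeWhile
          (fun l => !PySem.Str.isIn "INTEGRATION_TEST_FAILED" l) ls).map String.toList,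
          PySem.Chars.isIn "INTEGRATION_TEST_FAILED".toList p = false := by
        intro p hp
        obtain ⟨l, hl, rfl⟩ := List.mem_map.mp hp
        have h2 := List.mem_takeWhile_imp hl
        rw [← hq l]
        simpa using h2
      have hfq : PySem.Chars.isIn "INTEGRATION_TEST_FAILED".toList f'.toList = true := by
        have h2 := pv_dropWhile_head _ _ _ _ hdw
        rw [← hq f']
        simpa using h2
      have hB := pv_B_eval output.toList "INTEGRATION_TEST_FAILED".toList hm hcm
        _ _ _ hdecomp hTno hfq
      rw [hB]
      simp
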